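-- pv_equiv track=rewrite | github.com/karmusha/5---Python | dz4/dz4_common.py | split_elements
-- ===== SOURCE A (Python) =====
-- def split_elements(line: str):
--     res = ''
--     for x in line:
--         match x:
--             case '+':
--                 yield res
--                 res = '+'
--             case '-':
--                 yield res
--                 res = '-'
--             case ' ':
--                 pass
--             case '=':
--                 break
--             case _:
--                 res = res + x
--     yield res
-- ===== SOURCE B (Python) =====
-- def split_elements(line: str):
--     # Clean first (drop everything from the first '=', remove spaces),
--     # then cut at sign positions by slicing instead of accumulating chars.
--     cleaned = ''
--     for c in line:
--         if c == '=':
--             break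
--         if c != ' ':
--             cleaned += c
--     prev = 0
--     for p, c in enumerate(cleaned):
--         if c == '+' or c == '-':
--             yield cleaned[prev:p]
--             prev = p
--     yield cleaned[prev:]
-- ===== Notes on version B (the rewrite author's own statement) =====
-- stated objective: alternative
-- what changed: B first builds the cleaned string (everything before the first '=', spaces removed) and then emits tokens by slicing it at the '+'/'-' positions found with enumerate, instead of A's single match-statement loop that accumulates characters into a growing token string.
import Mathlib
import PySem

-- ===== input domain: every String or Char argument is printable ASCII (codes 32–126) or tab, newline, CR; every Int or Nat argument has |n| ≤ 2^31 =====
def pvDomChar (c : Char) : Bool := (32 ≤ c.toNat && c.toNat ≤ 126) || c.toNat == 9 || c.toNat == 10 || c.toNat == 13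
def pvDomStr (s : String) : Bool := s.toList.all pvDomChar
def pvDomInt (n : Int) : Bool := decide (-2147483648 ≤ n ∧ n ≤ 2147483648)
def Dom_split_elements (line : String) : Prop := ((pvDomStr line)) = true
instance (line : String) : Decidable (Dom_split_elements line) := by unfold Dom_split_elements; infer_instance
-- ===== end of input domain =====

-- B tokenizes by cleaning the line first and slicing at sign positions instead of
-- accumulating characters (objective: alternative decomposition, same cost).

-- ===== PORT A =====
-- A's generator loop: one accumulator `res`, match on each char, break at '='.
def pvALoop : List Char → String → List String
  | [], res => [res]
  | c :: cs, res =>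
    if c = '+' then res :: pvALoop cs "+"
    else if c = '-' then res :: pvALoop cs "-"
    else if c = ' ' then pvALoop cs res
    else if c = '=' then [res]
    else pvALoop cs (res.push c)

def split_elements (line : String) : List String := pvALoop line.toList ""

-- ===== PORT B =====
-- Source B's cleaning loop: stop at '=', drop spaces.
def pvClean : List Char → List Char
  | [] => []
  | c :: cs => if c = '=' then [] else if c ≠ ' ' then c :: pvClean cs else pvClean cs

-- Source B's slicing loop over `enumerate(cleaned)` with running start `prev`,
-- final yield `cleaned[prev:]` after the loop.
def pvBLoop (cl : List Char) : List (Int × Char) → Int → List String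
  | [], prev => [String.ofList (PySem.List.slice cl (some prev) none)]
  | (p, c) :: rest, prev =>
    if c = '+' ∨ c = '-' then
      String.ofList (PySem.List.slice cl (some prev) (some p)) :: pvBLoop cl rest p
    else pvBLoop cl rest prev

def split_elements_alt (line : String) : List String :=
  let cleaned := pvClean line.toList
  pvBLoop cleaned (PySem.List.enumerate cleaned 0) 0

-- ===== PRECONDITION & SPEC =====
def Spec_split_elements (line : String) (out : List String) : Prop := out = split_elements_alt line
instance (line : String) (out : List String) : Decidable (Spec_split_elements line out) := by unfold Spec_split_elements; infer_instance

-- ===== CLAIM (what is proved, stated in full; the proofs are below) =====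
def Claim_equal_split_elements : Prop := ∀ (line : String), Dom_split_elements line → Spec_split_elements line (split_elements line)

-- ===== LEMMAS AND PROOFS =====

-- Canonical tokenizer over the cleaned character list, accumulator as a char list.
def pvSpecTok : List Char → List Char → List String
  | [], acc => [String.ofList acc]
  | c :: cs, acc =>
    if c = '+' ∨ c = '-' then String.ofList acc :: pvSpecTok cs [c]
    else pvSpecTok cs (acc ++ [c])

theorem pvALoop_eq_spec (l : List Char) : ∀ acc : List Char,
    pvALoop l (String.ofList acc) = pvSpecTok (pvClean l) acc := by
  induction l with
  | nil => intro acc; simp [pvALoop, pvClean, pvSpecTok]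
  | cons c cs ih =>
    intro acc
    by_cases hp : c = '+'
    · subst hp
      have h1 : ("+" : String) = String.ofList ['+'] := rfl
      simp [pvALoop, pvClean, pvSpecTok, h1, ih]
    · by_cases hm : c = '-'
      · subst hm
        have h1 : ("-" : String) = String.ofList ['-'] := rfl
        simp [pvALoop, pvClean, pvSpecTok, h1, ih]
      · by_cases hs : c = ' '
        · subst hs
          simp [pvALoop, pvClean, ih]
        · by_cases he : c = '='
          · subst he
            simp [pvALoop, pvClean, pvSpecTok]
          · have hpush : (String.ofList acc).push c = String.ofList (acc ++ [c]) := by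
              simp [String.ofList, String.push]
            have hsign : ¬ (c = '+' ∨ c = '-') := by simp [hp, hm]
            have h1 : pvALoop (c :: cs) (String.ofList acc)
                = pvALoop cs ((String.ofList acc).push c) := by
              simp [pvALoop, hp, hm, hs, he]
            have h2 : pvClean (c :: cs) = c :: pvClean cs := by simp [pvClean, hs, he]
            rw [h1, hpush, ih, h2]
            simp [pvSpecTok, hsign]

theorem pvBLoop_eq_spec (cs : List Char) : ∀ (n prev : Nat) (cl : List Char),
    cl.drop n = cs → prev ≤ n →
    pvBLoop cl (PySem.List.enumerate cs (n : Int)) (prev : Int)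
      = pvSpecTok cs ((cl.drop prev).take (n - prev)) := by
  induction cs with
  | nil =>
    intro n prev cl hdrop hle
    have hlen : cl.length ≤ n := List.drop_eq_nil_iff.mp hdrop
    have htake : (cl.drop prev).take (n - prev) = cl.drop prev := by
      apply List.take_of_length_le
      simp [List.length_drop]
      omega
    simp [PySem.List.enumerate, pvBLoop, pvSpecTok, htake,
          PySem.List.slice_from_natCast]
  | cons c cs ih =>
    intro n prev cl hdrop hle
    have hdrop' : cl.drop (n + 1) = cs := by
      have h : List.drop 1 (List.drop n cl) = List.drop (n + 1) cl := by
        rw [List.drop_drop]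
      simpa [hdrop] using h.symm
    have hget : cl[n]? = some c := by
      have : (cl.drop n).head? = some c := by simp [hdrop]
      simpa [List.head?_drop] using this
    rw [PySem.List.enumerate_cons]
    by_cases hsign : c = '+' ∨ c = '-'
    · have hslice : PySem.List.slice cl (some (prev : Int)) (some (n : Int))
          = (cl.drop prev).take (n - prev) := PySem.List.slice_natCast cl prev n
      have hnext : (cl.drop n).take (n + 1 - n) = [c] := by
        simp [hdrop]
      have ihn := ih (n + 1) n cl hdrop' (by omega)
      rw [hnext] at ihn
      have hcast : ((n : Int) + 1) = ((n + 1 : Nat) : Int) := by push_cast; ring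
      simp only [pvBLoop, hsign, if_true, pvSpecTok, hslice, hcast, ihn]
    · have hnext : (cl.drop prev).take (n + 1 - prev) = (cl.drop prev).take (n - prev) ++ [c] := by
        have hm : n - prev < (cl.drop prev).length := by
          have : n < cl.length := by
            by_contra h
            have : cl.drop n = [] := List.drop_eq_nil_iff.mpr (by omega)
            simp [hdrop] at this
          simp [List.length_drop]; omega
        have hgetd : (cl.drop prev)[n - prev]? = some c := by
          rw [List.getElem?_drop, show prev + (n - prev) = n by omega, hget]
        rw [show n + 1 - prev = (n - prev) + 1 by omega, List.take_add_one, hgetd]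
        rfl
      have ihn := ih (n + 1) prev cl hdrop' (by omega)
      rw [hnext] at ihn
      have hcast : ((n : Int) + 1) = ((n + 1 : Nat) : Int) := by push_cast; ring
      simp only [pvBLoop, hsign, if_false, pvSpecTok, hcast, ihn]

-- ===== VERDICT (by name: the statement is the Claim_ definition above) =====
theorem split_elements_spec : Claim_equal_split_elements := by
  intro line _
  unfold Spec_split_elements split_elements split_elements_alt
  have hA : pvALoop line.toList "" = pvSpecTok (pvClean line.toList) [] := by
    have := pvALoop_eq_spec line.toList []
    simpa using this
  have hB := pvBLoop_eq_spec (pvClean line.toList) 0 0 (pvClean line.toList) (by simp) (le_refl 0)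
  simp only [hA]
  rw [show ((0 : Nat) : Int) = (0 : Int) by norm_num] at hB
  simp only [hB]
  simp
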